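-- pv_equiv track=rewrite | github.com/seanlaidlaw/FactYou | factyu/extraction/parser.py | spacy_sentence_html_mapping
-- ===== SOURCE A (Python) =====
-- def spacy_sentence_html_mapping(html_str):
--     """
--     Build a mapping from each character index in the plain text (obtained by stripping HTML tags)
--     to the corresponding character index in the original HTML string.
--     """
--     mapping = []
--     in_tag = False
--     for idx, char in enumerate(html_str):
--         if char == "<":
--             in_tag = True
--         elif char == ">":
--             in_tag = False
--             continue  # Do not include the '>' itself in plain text
--         elif not in_tag:
--             # Append the current HTML index for this plain text character.
--             mapping.append(idx)
--     return mapping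
-- ===== SOURCE B (Python) =====
-- def spacy_sentence_html_mapping(html_str):
--     # The tag-closing character always ends any tag state (and is never emitted),
--     # so split on it: within each piece the plain text is exactly the prefix
--     # before the first tag-opening character.
--     mapping = []
--     offset = 0
--     for seg in html_str.split('>'):
--         cut = seg.index('<') if '<' in seg else len(seg)
--         mapping.extend(range(offset, offset + cut))
--         offset += len(seg) + 1
--     return mapping
-- ===== Notes on version B (the rewrite author's own statement) =====
-- stated objective: faster
-- what changed: Replaces the per-character in_tag state machine with a stateless decomposition: split the string on the tag-closing character (which always ends tag state and is never emitted) and, for each piece, emit the index range of the prefix before its first tag-opening character.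
import Mathlib
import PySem

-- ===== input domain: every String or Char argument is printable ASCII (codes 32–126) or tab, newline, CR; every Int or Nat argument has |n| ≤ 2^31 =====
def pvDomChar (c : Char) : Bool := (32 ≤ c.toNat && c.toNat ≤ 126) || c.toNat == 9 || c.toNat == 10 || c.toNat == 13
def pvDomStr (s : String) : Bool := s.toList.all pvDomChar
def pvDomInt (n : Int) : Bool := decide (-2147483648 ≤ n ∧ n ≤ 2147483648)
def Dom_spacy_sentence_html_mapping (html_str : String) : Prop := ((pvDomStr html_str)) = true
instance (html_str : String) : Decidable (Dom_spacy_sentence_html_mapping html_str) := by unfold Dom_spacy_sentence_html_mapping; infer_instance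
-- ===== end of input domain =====

-- B replaces A's per-character in_tag state machine with a stateless decomposition
-- (split on the tag-closing character, emit each piece's prefix before its first
-- tag-opening character); measured faster by a constant factor (C-level split/index).

-- ===== PORT A =====
def spacy_sentence_html_mapping (html_str : String) : List Int :=
  ((PySem.List.enumerate html_str.toList).foldl
    (fun (st : List Int × Bool) (p : Int × Char) =>
      if p.2 = '<' then (st.1, true)
      else if p.2 = '>' then (st.1, false)
      else if st.2 = false then (st.1 ++ [p.1], st.2)
      else st)
    ([], false)).1

-- ===== PORT B =====
-- str.split with a one-character separator is ported as List.splitOn (Python-exact here);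
-- the conditional index-or-length expression is ported literally.
def spacy_sentence_html_mapping_alt (html_str : String) : List Int :=
  ((html_str.toList.splitOn '>').foldl
    (fun (st : List Int × Int) (seg : List Char) =>
      let cut : Int := if '<' ∈ seg then ((seg.idxOf '<' : Nat) : Int) else ((seg.length : Nat) : Int)
      (st.1 ++ PySem.List.pyRange st.2 (st.2 + cut) 1, st.2 + ((seg.length : Nat) : Int) + 1))
    ([], 0)).1

-- ===== PRECONDITION & SPEC =====
def Spec_spacy_sentence_html_mapping (html_str : String) (out : List Int) : Prop := out = spacy_sentence_html_mapping_alt html_str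
instance (html_str : String) (out : List Int) : Decidable (Spec_spacy_sentence_html_mapping html_str out) := by unfold Spec_spacy_sentence_html_mapping; infer_instance

-- ===== CLAIM (what is proved, stated in full; the proofs are below) =====
def Claim_equal_spacy_sentence_html_mapping : Prop := ∀ (html_str : String), Dom_spacy_sentence_html_mapping html_str → Spec_spacy_sentence_html_mapping html_str (spacy_sentence_html_mapping html_str)

-- ===== LEMMAS AND PROOFS =====

/-- A's loop, written as a structural recursion producing the mapping front-to-back. -/
def pvRunA : List Char → Int → Bool → List Int
  | [], _, _ => []
  | c :: cs, i, t =>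
    if c = '<' then pvRunA cs (i+1) true
    else if c = '>' then pvRunA cs (i+1) false
    else if t = false then i :: pvRunA cs (i+1) false
    else pvRunA cs (i+1) t

/-- B's per-segment cut: index of the first '<', or the segment length. -/
def pvCut (seg : List Char) : Int :=
  if '<' ∈ seg then ((seg.idxOf '<' : Nat) : Int) else ((seg.length : Nat) : Int)

/-- B's loop over the segments, written as a structural recursion. -/
def pvRunB : List (List Char) → Int → List Int
  | [], _ => []
  | seg :: rest, off =>
    PySem.List.pyRange off (off + pvCut seg) 1 ++ pvRunB rest (off + ((seg.length : Nat) : Int) + 1)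

lemma pvCut_nonneg (seg : List Char) : 0 ≤ pvCut seg := by
  unfold pvCut; split <;> exact Int.natCast_nonneg _

lemma pvCut_lt_cons (s0 : List Char) : pvCut ('<' :: s0) = 0 := by
  simp [pvCut]

lemma pvCut_cons_ne {c : Char} (h : c ≠ '<') (s0 : List Char) :
    pvCut (c :: s0) = pvCut s0 + 1 := by
  by_cases hm : '<' ∈ s0
  · have : '<' ∈ c :: s0 := List.mem_cons_of_mem _ hm
    simp [pvCut, hm, this, (by simpa using h : ¬ (c = '<'))]
  · have : ¬ '<' ∈ c :: s0 := by
      intro hx; rcases List.mem_cons.mp hx with h1 | h2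
      · exact h h1.symm
      · exact hm h2
    simp [pvCut, hm, this]

lemma pvSplit_nil : (([] : List Char).splitOn '>') = [[]] := by
  simp [List.splitOn]

lemma pvSplit_cons_pos (cs : List Char) :
    (('>' :: cs).splitOn '>') = [] :: cs.splitOn '>' := by
  simp [List.splitOn, List.splitOnP_cons]

lemma pvSplit_cons_neg {c : Char} (h : c ≠ '>') (cs : List Char) :
    ((c :: cs).splitOn '>') = (cs.splitOn '>').modifyHead (c :: ·) := by
  simp [List.splitOn, List.splitOnP_cons, h]

lemma pvSplit_ne_nil (cs : List Char) : cs.splitOn '>' ≠ [] := by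
  induction cs with
  | nil => rw [pvSplit_nil]; simp
  | cons c cs ih =>
    by_cases h : c = '>'
    · subst h; rw [pvSplit_cons_pos]; simp
    · rw [pvSplit_cons_neg h]
      cases hS : cs.splitOn '>' with
      | nil => exact absurd hS ih
      | cons s0 rest => simp

/-- Fold form of A's loop equals the recursion, with any accumulator. -/
lemma pvFoldA (cs : List Char) : ∀ (i : Int) (t : Bool) (acc : List Int),
    ((PySem.List.enumerate cs i).foldl
      (fun (st : List Int × Bool) (p : Int × Char) =>
        if p.2 = '<' then (st.1, true)
        else if p.2 = '>' then (st.1, false)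
        else if st.2 = false then (st.1 ++ [p.1], st.2)
        else st)
      (acc, t)).1 = acc ++ pvRunA cs i t := by
  induction cs with
  | nil => intro i t acc; simp [PySem.List.enumerate_nil, pvRunA]
  | cons c cs ih =>
    intro i t acc
    rw [PySem.List.enumerate_cons, List.foldl_cons]
    by_cases h1 : c = '<'
    · subst h1
      show (List.foldl _ (acc, true) _).1 = _
      rw [ih]; simp [pvRunA]
    · by_cases h2 : c = '>'
      · subst h2
        show (List.foldl _ (acc, false) _).1 = _
        rw [ih]; simp [pvRunA, h1]
      · cases t with
        | false =>
          have hf : (if (i, c).2 = '<' then (((acc, false) : List Int × Bool).1, true)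
              else if (i, c).2 = '>' then ((acc, false).1, false)
              else if ((acc, false) : List Int × Bool).2 = false then ((acc, false).1 ++ [(i, c).1], (acc, false).2)
              else (acc, false)) = ((acc ++ [i] : List Int), false) := by
            simp [h1, h2]
          rw [hf, ih]
          simp [pvRunA, h1, h2]
        | true =>
          have hf : (if (i, c).2 = '<' then (((acc, true) : List Int × Bool).1, true)
              else if (i, c).2 = '>' then ((acc, true).1, false)
              else if ((acc, true) : List Int × Bool).2 = false then ((acc, true).1 ++ [(i, c).1], (acc, true).2)
              else (acc, true)) = ((acc : List Int), true) := by
            simp [h1, h2]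
          rw [hf, ih]
          simp [pvRunA, h1, h2]

/-- Fold form of B's loop equals the recursion, with any accumulator. -/
lemma pvFoldB (segs : List (List Char)) : ∀ (off : Int) (acc : List Int),
    ((segs.foldl
      (fun (st : List Int × Int) (seg : List Char) =>
        let cut : Int := if '<' ∈ seg then ((seg.idxOf '<' : Nat) : Int) else ((seg.length : Nat) : Int)
        (st.1 ++ PySem.List.pyRange st.2 (st.2 + cut) 1, st.2 + ((seg.length : Nat) : Int) + 1))
      (acc, off)).1) = acc ++ pvRunB segs off := by
  induction segs with
  | nil => intro off acc; simp [pvRunB]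
  | cons seg rest ih =>
    intro off acc
    rw [List.foldl_cons]
    show ((rest.foldl _ (acc ++ PySem.List.pyRange off (off + pvCut seg) 1,
        off + ((seg.length : Nat) : Int) + 1)).1) = _
    rw [ih]
    simp [pvRunB]

/-- Core equivalence: A's state machine equals B's segment decomposition.
    The second conjunct handles the in-tag state: it equals B restarted after the
    current segment (the text up to the next '>'), which closes the tag. -/
lemma pvMain (cs : List Char) :
    (∀ i : Int, pvRunA cs i false = pvRunB (cs.splitOn '>') i) ∧
    (∀ j : Int, pvRunA cs j true =
       pvRunB (cs.splitOn '>').tail (j + (((cs.splitOn '>').headI.length : Nat) : Int) + 1)) := by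
  induction cs with
  | nil =>
    constructor
    · intro i
      rw [pvSplit_nil]
      simp [pvRunA, pvRunB, pvCut, PySem.List.pyRange_one_eq_nil le_rfl]
    · intro j
      rw [pvSplit_nil]
      simp [pvRunA, pvRunB]
  | cons c cs ih =>
    obtain ⟨ih1, ih2⟩ := ih
    by_cases hgt : c = '>'
    · subst hgt
      have eA : ∀ i : Int, pvRunA ('>' :: cs) i false = pvRunA cs (i+1) false := by
        intro i; simp [pvRunA]
      have eA' : ∀ j : Int, pvRunA ('>' :: cs) j true = pvRunA cs (j+1) false := by
        intro j; simp [pvRunA]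
      constructor
      · intro i
        rw [pvSplit_cons_pos, eA, ih1]
        simp [pvRunB, pvCut, PySem.List.pyRange_one_eq_nil le_rfl]
      · intro j
        rw [pvSplit_cons_pos, eA', ih1]
        simp
    · obtain ⟨s0, rest, hS⟩ : ∃ s0 rest, cs.splitOn '>' = s0 :: rest := by
        cases h : cs.splitOn '>' with
        | nil => exact absurd h (pvSplit_ne_nil cs)
        | cons a b => exact ⟨a, b, rfl⟩
      have hsplit : ((c :: cs).splitOn '>') = (c :: s0) :: rest := by
        rw [pvSplit_cons_neg hgt, hS]; rfl
      have hIH2 : ∀ j : Int, pvRunA cs j true = pvRunB rest (j + ((s0.length : Nat) : Int) + 1) := by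
        intro j; rw [ih2, hS]; rfl
      constructor
      · intro i
        by_cases hlt : c = '<'
        · subst hlt
          have eA : pvRunA ('<' :: cs) i false = pvRunA cs (i+1) true := by
            simp [pvRunA]
          rw [hsplit, eA, hIH2]
          simp only [pvRunB, pvCut_lt_cons]
          rw [PySem.List.pyRange_one_eq_nil (by omega)]
          simp only [List.nil_append, List.length_cons]
          congr 1
          push_cast; ring
        · have eA : pvRunA (c :: cs) i false = i :: pvRunA cs (i+1) false := by
            simp [pvRunA, hlt, hgt]
          rw [hsplit, eA, ih1, hS]
          have hR : pvRunB ((c :: s0) :: rest) i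
              = PySem.List.pyRange i (i + pvCut (c :: s0)) 1
                ++ pvRunB rest (i + (((c :: s0).length : Nat) : Int) + 1) := rfl
          rw [hR, pvCut_cons_ne hlt,
            PySem.List.pyRange_one_cons (by have := pvCut_nonneg s0; omega),
            List.cons_append]
          have e1 : i + (pvCut s0 + 1) = (i + 1) + pvCut s0 := by ring
          have e2 : i + ((((c :: s0).length : Nat)) : Int) + 1
              = (i + 1) + ((s0.length : Nat) : Int) + 1 := by
            simp only [List.length_cons]; push_cast; ring
          rw [e1, e2]
          have hL : pvRunB (s0 :: rest) (i + 1)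
              = PySem.List.pyRange (i + 1) ((i + 1) + pvCut s0) 1
                ++ pvRunB rest ((i + 1) + ((s0.length : Nat) : Int) + 1) := rfl
          rw [hL]
      · intro j
        have eA : pvRunA (c :: cs) j true = pvRunA cs (j+1) true := by
          by_cases hlt : c = '<'
          · subst hlt; simp [pvRunA]
          · simp [pvRunA, hlt, hgt]
        rw [hsplit, eA, hIH2]
        simp only [List.tail_cons, List.headI]
        congr 1
        simp only [List.length_cons]
        push_cast; ring

-- ===== VERDICT (by name: the statement is the Claim_ definition above) =====
theorem spacy_sentence_html_mapping_spec : Claim_equal_spacy_sentence_html_mapping := by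
  intro html _
  show spacy_sentence_html_mapping html = spacy_sentence_html_mapping_alt html
  unfold spacy_sentence_html_mapping spacy_sentence_html_mapping_alt
  rw [pvFoldA, pvFoldB]
  simpa using (pvMain html.toList).1 0
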